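-- pv_equiv track=rewrite | github.com/pypi-data/pypi-mirror-85 | packages/persontitles/persontitles-0.1.3.tar.gz/persontitles-0.1.3/persontitles/academic_german.py | add_empty_space
-- ===== SOURCE A (Python) =====
-- def add_empty_space(degrees) -> list:
--     """
--     A degree like "Dipl.agr.biol." has no empty spaces between the grade of
--     the degree (Dipl.) and its specification (agr. biol.). To make sure that
--     both ways of writing are covered, the degree will be replicated as "Dipl.
--     agr. biol.".
--     """
--
--     degrees_w_empty_space = []
--     for degree in degrees:
--         degree_w_space = ''
--         dot_counter = 1
--         max = len(degree) - 1
--         for i, ch in enumerate(degree):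
--             if ch == '.' and i == max:
--                 if degree_w_space != '':
--                     degrees_w_empty_space.append(degree_w_space.strip())
--                 else:
--                     degrees_w_empty_space.append(degree.strip())
--             elif ch == '.' and i < max:
--                 if degree[i + 1] not in ['-', ')']:
--                     if degree_w_space == '':
--                         degree_w_space = degree[:i + 1] + ' ' + degree[i + 1:]
--                         dot_counter += 1
--                     else:
--                         degree_w_space = degree_w_space[:i+dot_counter] + ' ' + degree_w_space[i+dot_counter:]  # noqa
--                         dot_counter += 1
--             elif i == max:
--                 if degree_w_space != '':
--                     degrees_w_empty_space.append(degree_w_space.strip())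
--                 else:
--                     degrees_w_empty_space.append(degree.strip())
--
--     return degrees_w_empty_space
-- ===== SOURCE B (Python) =====
-- def add_empty_space(degrees) -> list:
--     """Single forward pass per degree: copy each char and add a space after
--     every '.' not followed by '-' or ')'; strip once at the end (this removes
--     the space a trailing dot gets).  Skips empty strings like the original."""
--     degrees_w_empty_space = []
--     for degree in degrees:
--         if degree:
--             spaced = []
--             for j, ch in enumerate(degree):
--                 spaced.append(ch)
--                 if ch == '.' and degree[j+1:j+2] not in ('-', ')'):
--                     spaced.append(' ')
--             degrees_w_empty_space.append(''.join(spaced).strip())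
--     return degrees_w_empty_space
-- ===== Notes on version B (the rewrite author's own statement) =====
-- stated objective: simpler
-- what changed: A repeatedly re-slices and reconcatenates the whole working string at each dot, tracking a dot_counter offset and appending the result from inside the loop at the last index; B makes one forward pass that copies characters into a list and appends a space right after each qualifying dot, joining and stripping once after the loop.
import Mathlib
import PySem

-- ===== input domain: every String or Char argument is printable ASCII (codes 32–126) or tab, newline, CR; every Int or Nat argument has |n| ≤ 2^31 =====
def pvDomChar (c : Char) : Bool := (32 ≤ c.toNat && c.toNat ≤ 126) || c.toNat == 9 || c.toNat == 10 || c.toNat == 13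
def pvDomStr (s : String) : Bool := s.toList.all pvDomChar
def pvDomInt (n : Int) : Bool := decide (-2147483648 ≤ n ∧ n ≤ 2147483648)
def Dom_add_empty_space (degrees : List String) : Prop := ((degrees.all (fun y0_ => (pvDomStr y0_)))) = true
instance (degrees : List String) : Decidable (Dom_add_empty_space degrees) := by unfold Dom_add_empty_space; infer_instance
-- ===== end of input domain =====

-- B replaces A's repeated whole-string re-slicing with dot_counter offset bookkeeping by a
-- single forward pass that copies chars and appends a space after each qualifying dot.

-- ===== PORT A =====
-- one iteration of A's inner `for i, ch in enumerate(degree)` loop; the fixed context is the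
-- original string `l` (as a char list) and `mx` = len(degree) - 1; the state is
-- (degrees_w_empty_space, degree_w_space, dot_counter)
def aStep (l : List Char) (mx : Nat) (st : List String × List Char × Int)
    (p : Char × Nat) : List String × List Char × Int :=
  let (acc, dws, dc) := st
  let (ch, i) := p
  if ch = '.' ∧ i = mx then
    (if dws ≠ [] then acc ++ [String.ofList (PySem.Chars.strip dws)]
     else acc ++ [String.ofList (PySem.Chars.strip l)], dws, dc)
  else if ch = '.' ∧ i < mx then
    match PySem.List.pyGet? l ((i : Int) + 1) with   -- degree[i + 1]; i < mx so always `some`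
    | some nxt =>
      if ¬ (nxt = '-' ∨ nxt = ')') then
        if dws = [] then
          (acc, PySem.List.slice l none (some ((i : Int) + 1)) ++
                ' ' :: PySem.List.slice l (some ((i : Int) + 1)) none, dc + 1)
        else
          (acc, PySem.List.slice dws none (some ((i : Int) + dc)) ++
                ' ' :: PySem.List.slice dws (some ((i : Int) + dc)) none, dc + 1)
      else (acc, dws, dc)
    | none => (acc, dws, dc)
  else if i = mx then
    (if dws ≠ [] then acc ++ [String.ofList (PySem.Chars.strip dws)]
     else acc ++ [String.ofList (PySem.Chars.strip l)], dws, dc)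
  else (acc, dws, dc)

def add_empty_space (degrees : List String) : List String :=
  degrees.foldl (fun acc degree =>
    let l := degree.toList
    ((l.zipIdx).foldl (aStep l (l.length - 1)) (acc, ([] : List Char), (1 : Int))).1) []

-- ===== PORT B =====
-- one iteration of B's inner `for j, ch in enumerate(degree)` loop; `l` is the original string,
-- the state is the `spaced` char list; `degree[j+1:j+2] not in ('-', ')')` is the slice test
def bStep (l : List Char) (sp : List Char) (p : Char × Nat) : List Char :=
  let (ch, j) := p
  let sp' := sp ++ [ch]
  if ch = '.' ∧ ¬ (PySem.List.slice l (some ((j : Int) + 1)) (some ((j : Int) + 2)) = ['-'] ∨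
                   PySem.List.slice l (some ((j : Int) + 1)) (some ((j : Int) + 2)) = [')']) then
    sp' ++ [' ']
  else sp'

def add_empty_space_alt (degrees : List String) : List String :=
  degrees.foldl (fun out degree =>
    if degree.toList ≠ [] then
      out ++ [String.ofList (PySem.Chars.strip
        ((degree.toList.zipIdx).foldl (bStep degree.toList) []))]
    else out) []

-- ===== PRECONDITION & SPEC =====
def Spec_add_empty_space (degrees : List String) (out : List String) : Prop := out = add_empty_space_alt degrees
instance (degrees : List String) (out : List String) : Decidable (Spec_add_empty_space degrees out) := by unfold Spec_add_empty_space; infer_instance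

-- ===== CLAIM (what is proved, stated in full; the proofs are below) =====
def Claim_equal_add_empty_space : Prop := ∀ (degrees : List String), Dom_add_empty_space degrees → Spec_add_empty_space degrees (add_empty_space degrees)

-- ===== LEMMAS AND PROOFS =====

-- does the char after a dot allow the inserted space?  (none = no following char)
def qualN : List Char → Bool
  | [] => false
  | d :: _ => !(d = '-' || d = ')')

-- spaces inserted in `pre` with one-char lookahead continuing into `suf`
def ins : List Char → List Char → List Char
  | [], _ => []
  | c :: rest, suf =>
    if c = '.' ∧ qualN (rest ++ suf) = true then c :: ' ' :: ins rest suf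
    else c :: ins rest suf

-- B's per-string result, recursively (a trailing dot DOES get a space, stripped later)
def bSub : List Char → List Char
  | [] => []
  | c :: rest =>
    if c = '.' ∧ ¬ (rest.take 1 = ['-'] ∨ rest.take 1 = [')']) then c :: ' ' :: bSub rest
    else c :: bSub rest

lemma ins_snoc (pre : List Char) (c : Char) (suf : List Char) :
    ins (pre ++ [c]) suf =
      ins pre (c :: suf) ++ (if c = '.' ∧ qualN suf = true then [c, ' '] else [c]) := by
  induction pre with
  | nil => simp [ins]
  | cons a rest ih =>
      have hnorm : (rest ++ [c]) ++ suf = rest ++ (c :: suf) := by simp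
      simp only [List.cons_append, ins, hnorm, ih]
      split_ifs <;> simp

lemma ins_len_ge (pre suf : List Char) : pre.length ≤ (ins pre suf).length := by
  induction pre with
  | nil => simp [ins]
  | cons a rest ih => simp only [ins]; split_ifs <;> simp <;> omega

lemma ins_eq_self (pre suf : List Char) (h : (ins pre suf).length = pre.length) :
    ins pre suf = pre := by
  induction pre with
  | nil => simp [ins]
  | cons a rest ih =>
      simp only [ins] at h ⊢
      split_ifs at h ⊢ with hc
      · exfalso; have := ins_len_ge rest suf; simp at h; omega
      · simp at h ⊢; exact ih h

lemma bSub_eq_ins (l : List Char) :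
    bSub l = ins l [] ++ (if l.getLast? = some '.' then [' '] else []) := by
  induction l with
  | nil => simp [bSub, ins]
  | cons c rest ih =>
      cases rest with
      | nil =>
          by_cases hc : c = '.'
          · simp [bSub, ins, qualN, hc]
          · simp [bSub, ins, qualN, hc]
      | cons d rest' =>
          have hcond : (c = '.' ∧ ¬((d :: rest').take 1 = ['-'] ∨ (d :: rest').take 1 = [')']))
              ↔ (c = '.' ∧ qualN ((d :: rest') ++ []) = true) := by
            simp [qualN]
          have hins_cons : ∀ (a : Char) (r s : List Char), ins (a :: r) s =
              if a = '.' ∧ qualN (r ++ s) = true then a :: ' ' :: ins r s else a :: ins r s :=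
            fun _ _ _ => rfl
          have hbSub_cons : bSub (c :: d :: rest') =
              if c = '.' ∧ ¬((d :: rest').take 1 = ['-'] ∨ (d :: rest').take 1 = [')']) then
                c :: ' ' :: bSub (d :: rest') else c :: bSub (d :: rest') := rfl
          rw [hbSub_cons]
          rw [if_congr hcond rfl rfl, hins_cons c (d :: rest') [], List.getLast?_cons_cons]
          by_cases h : c = '.' ∧ qualN ((d :: rest') ++ []) = true
          · rw [if_pos h, if_pos h, ih]; simp
          · rw [if_neg h, if_neg h, ih]; simp

lemma strip_append_space (x : List Char) :
    PySem.Chars.strip (x ++ [' ']) = PySem.Chars.strip x := by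
  have hsp : PySem.Chars.isspace ' ' = true := by decide
  simp only [PySem.Chars.strip, PySem.Chars.lstrip, PySem.Chars.rstrip]
  rw [List.dropWhile_append]
  by_cases h : (List.dropWhile PySem.Chars.isspace x).isEmpty
  · have hx : List.dropWhile PySem.Chars.isspace x = [] := by simpa using h
    simp [hx, hsp]
  · simp only [h, if_false, Bool.false_eq_true]
    simp [List.reverse_append, hsp]

-- A's loop invariant after the first i characters: dot_counter is one more than the number of
-- inserted spaces k, and degree_w_space is empty iff k = 0, else the spaced prefix ++ the rest
def InvA (l : List Char) (i : Nat) (dws : List Char) (dc : Int) : Prop :=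
  ∃ k : Nat, (ins (l.take i) (l.drop i)).length = i + k ∧ dc = (k : Int) + 1 ∧
    dws = (if k = 0 then [] else ins (l.take i) (l.drop i) ++ l.drop i)

lemma loopA (l : List Char) (tl : List Char) :
    ∀ (i : Nat), tl = l.drop i → tl ≠ [] →
    ∀ (acc : List String) (dws : List Char) (dc : Int), InvA l i dws dc →
    ((tl.zipIdx i).foldl (aStep l (l.length - 1)) (acc, dws, dc)).1 =
      acc ++ [String.ofList (PySem.Chars.strip (ins l []))] := by
  induction tl with
  | nil => intro _ _ hne; exact absurd rfl hne
  | cons c rest ih =>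
      intro i htl _ acc dws dc hinv
      obtain ⟨k, hlen, hdc, hdws⟩ := hinv
      have hi : i < l.length := by
        by_contra hge
        rw [List.drop_eq_nil_of_le (by omega)] at htl
        exact List.cons_ne_nil _ _ htl
      have hdropi := List.drop_eq_getElem_cons hi
      rw [← htl] at hdropi
      have hc : l[i] = c := by injection hdropi with h1 _; exact h1.symm
      have hrest : rest = l.drop (i + 1) := by injection hdropi with _ h2
      have htake : l.take (i + 1) = l.take i ++ [c] := by
        rw [List.take_add_one]
        simp [List.getElem?_eq_getElem hi, hc]
      have htakelen : (l.take i).length = i := by simp; omega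
      have hP : ins (l.take i) (l.drop i) = ins (l.take i) (c :: l.drop (i + 1)) := by
        rw [← htl, hrest]
      cases rest with
      | nil =>
          -- i is the last index: A appends and the loop ends
          have hlast : l.drop (i + 1) = [] := hrest.symm
          have hlen2 : l.length = i + 1 := by
            have := List.length_drop (l := l) (i := i + 1)
            rw [hlast] at this; simp at this; omega
          have hl : l = l.take i ++ [c] := by
            conv_lhs => rw [← List.take_append_drop i l, ← htl]
          have hinsl : ins l [] = ins (l.take i) (l.drop i) ++ [c] := by
            rw [hP, hlast]
            conv_lhs => rw [hl]
            rw [ins_snoc]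
            simp [qualN]
          have hmx : l.length - 1 = i := by omega
          have happ :
              (if dws ≠ [] then acc ++ [String.ofList (PySem.Chars.strip dws)]
               else acc ++ [String.ofList (PySem.Chars.strip l)]) =
              acc ++ [String.ofList (PySem.Chars.strip (ins l []))] := by
            by_cases hk : k = 0
            · have hP0 : ins (l.take i) (l.drop i) = l.take i := by
                apply ins_eq_self; omega
              have hdws0 : dws = [] := by rw [hdws, if_pos hk]
              rw [hdws0]
              simp only [ne_eq, not_true_eq_false, if_false]
              rw [hinsl, hP0, ← hl]
            · have hdws' : dws = ins (l.take i) (l.drop i) ++ l.drop i := by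
                rw [hdws, if_neg hk]
              have : dws = ins l [] := by
                rw [hdws', hinsl, ← htl, hrest, hlast]
              rw [this]
              simp [hinsl]
          simp only [List.zipIdx_cons, List.zipIdx_nil, List.foldl_cons, List.foldl_nil]
          by_cases hcdot : c = '.'
          · simp only [aStep, hcdot, hmx, and_true, true_and]
            simpa using happ
          · simp only [aStep, hcdot, hmx, false_and, ite_false]
            simpa using happ
      | cons d rest' =>
          have hdrop1 : l.drop (i + 1) = d :: rest' := hrest.symm
          have hi1 : i + 1 < l.length := by
            by_contra hge
            rw [List.drop_eq_nil_of_le (by omega)] at hdrop1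
            exact List.cons_ne_nil _ _ hdrop1.symm
          have hmx : ¬ (i = l.length - 1) := by omega
          have hd : l[i + 1]'hi1 = d := by
            have := List.drop_eq_getElem_cons hi1
            rw [hdrop1] at this
            injection this with h1 _; exact h1.symm
          have hcast1 : ((i : Int) + 1) = ((i + 1 : Nat) : Int) := by push_cast; ring
          have hget : PySem.List.pyGet? l ((i : Int) + 1) = some d := by
            rw [hcast1, PySem.List.pyGet?_natCast]
            simp [List.getElem?_eq_getElem hi1, hd]
          have hP' :
              ins (l.take (i + 1)) (l.drop (i + 1)) =
                ins (l.take i) (l.drop i) ++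
                  (if c = '.' ∧ qualN (l.drop (i + 1)) = true then [c, ' '] else [c]) := by
            rw [htake, ins_snoc, hP]
          have hq : qualN (l.drop (i + 1)) = !(d = '-' || d = ')') := by
            rw [hdrop1]; rfl
          simp only [List.zipIdx_cons, List.foldl_cons]
          by_cases hcdot : c = '.'
          · by_cases hskip : d = '-' ∨ d = ')'
            · -- dot whose next char is '-' or ')': state unchanged
              have hstep : aStep l (l.length - 1) (acc, dws, dc) (c, i) = (acc, dws, dc) := by
                simp [aStep, hcdot, hmx, hget, hskip]
              rw [hstep]
              apply ih (i + 1) hrest (List.cons_ne_nil _ _)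
              refine ⟨k, ?_, hdc, ?_⟩
              · rw [hP']
                have : ¬ (c = '.' ∧ qualN (l.drop (i + 1)) = true) := by
                  rw [hq]; rcases hskip with h|h <;> simp [h]
                rw [if_neg this]
                simp [hlen]; omega
              · rw [hP']
                have : ¬ (c = '.' ∧ qualN (l.drop (i + 1)) = true) := by
                  rw [hq]; rcases hskip with h|h <;> simp [h]
                rw [if_neg this, hdws]
                by_cases hk : k = 0
                · simp [hk]
                · simp only [hk, ite_false]
                  rw [← htl, hrest, hdrop1]
                  simp
            · -- a qualifying dot: a space is inserted
              have hqual : c = '.' ∧ qualN (l.drop (i + 1)) = true := by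
                refine ⟨hcdot, ?_⟩; rw [hq]; simp; tauto
              have hPgrow : ins (l.take (i + 1)) (l.drop (i + 1)) =
                  ins (l.take i) (l.drop i) ++ [c, ' '] := by
                rw [hP', if_pos hqual]
              by_cases hk : k = 0
              · -- first insertion: built from slices of the original string
                have hdws0 : dws = [] := by rw [hdws, if_pos hk]
                have hP0 : ins (l.take i) (l.drop i) = l.take i := by
                  apply ins_eq_self; omega
                have hlt : i < l.length - 1 := by omega
                have hsl1 : PySem.List.slice l none (some ((i : Int) + 1)) = l.take (i + 1) := by
                  rw [hcast1, PySem.List.slice_to_natCast]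
                have hsl2 : PySem.List.slice l (some ((i : Int) + 1)) none = l.drop (i + 1) := by
                  rw [hcast1, PySem.List.slice_from_natCast]
                have hstep : aStep l (l.length - 1) (acc, dws, dc) (c, i) =
                    (acc, l.take (i + 1) ++ ' ' :: l.drop (i + 1), dc + 1) := by
                  simp [aStep, hcdot, hmx, hget, hskip, hdws0, hlt, hsl1, hsl2]
                rw [hstep]
                apply ih (i + 1) hrest (List.cons_ne_nil _ _)
                refine ⟨1, ?_, by omega, ?_⟩
                · rw [hPgrow, hP0]; simp; omega
                · simp only [one_ne_zero, ite_false]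
                  rw [hPgrow, hP0, htake]
                  simp
              · -- later insertion: built from slices of degree_w_space at offset i + dot_counter
                have hdws' : dws = ins (l.take i) (l.drop i) ++ l.drop i := by
                  rw [hdws, if_neg hk]
                have hidc : ((i : Int) + dc) = ((i + k + 1 : Nat) : Int) := by
                  rw [hdc]; push_cast; ring
                have htk : dws.take (i + k + 1) = ins (l.take i) (l.drop i) ++ [c] := by
                  rw [hdws', List.take_append, List.take_of_length_le (by omega), hlen]
                  rw [← htl]
                  congr 1
                  simp
                have hdr : dws.drop (i + k + 1) = l.drop (i + 1) := by
                  rw [hdws', List.drop_append, List.drop_of_length_le (by omega), hlen]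
                  rw [← htl, hrest]
                  simp
                have hlt : i < l.length - 1 := by omega
                have hcastk : ((i : Int) + (k : Int) + 1) = ((i + k + 1 : Nat) : Int) := by
                  push_cast; ring
                have hsl1 : PySem.List.slice dws none (some ((i : Int) + (k : Int) + 1)) =
                    ins (l.take i) (l.drop i) ++ [c] := by
                  rw [hcastk, PySem.List.slice_to_natCast, htk]
                have hsl2 : PySem.List.slice dws (some ((i : Int) + (k : Int) + 1)) none =
                    l.drop (i + 1) := by
                  rw [hcastk, PySem.List.slice_from_natCast, hdr]
                have hstep : aStep l (l.length - 1) (acc, dws, dc) (c, i) =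
                    (acc, (ins (l.take i) (l.drop i) ++ [c]) ++ ' ' :: l.drop (i + 1), dc + 1) := by
                  have hne' : dws ≠ [] := by
                    rw [hdws']
                    intro hcontra
                    have hnil := List.append_eq_nil_iff.mp hcontra
                    rw [← htl] at hnil
                    exact List.cons_ne_nil _ _ hnil.2
                  simp only [aStep, hcdot, hmx, hget, hskip, hne', hdc, hlt]
                  rw [show ((i : Int) + ((k : Int) + 1)) = ((i : Int) + (k : Int) + 1) from by ring]
                  simp [hsl1, hsl2, hcdot]
                rw [hstep]
                apply ih (i + 1) hrest (List.cons_ne_nil _ _)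
                refine ⟨k + 1, ?_, by omega, ?_⟩
                · rw [hPgrow]; simp [hlen]; omega
                · simp only [Nat.add_one_ne_zero, ite_false]
                  rw [hPgrow]
                  simp
          · -- not a dot and not the last index: state unchanged
            have hstep : aStep l (l.length - 1) (acc, dws, dc) (c, i) = (acc, dws, dc) := by
              simp [aStep, hcdot, hmx]
            rw [hstep]
            apply ih (i + 1) hrest (List.cons_ne_nil _ _)
            refine ⟨k, ?_, hdc, ?_⟩
            · rw [hP']
              have : ¬ (c = '.' ∧ qualN (l.drop (i + 1)) = true) := by simp [hcdot]
              rw [if_neg this]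
              simp [hlen]; omega
            · rw [hP']
              have : ¬ (c = '.' ∧ qualN (l.drop (i + 1)) = true) := by simp [hcdot]
              rw [if_neg this, hdws]
              by_cases hk : k = 0
              · simp [hk]
              · simp only [hk, ite_false]
                rw [← htl, hrest, hdrop1]
                simp

lemma loopB (l : List Char) (tl : List Char) :
    ∀ (j : Nat), tl = l.drop j → ∀ (sp : List Char),
      (tl.zipIdx j).foldl (bStep l) sp = sp ++ bSub tl := by
  induction tl with
  | nil => intro j _ sp; simp [bSub]
  | cons c rest ih =>
      intro j htl sp
      have hj : j < l.length := by
        by_contra hge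
        rw [List.drop_eq_nil_of_le (by omega)] at htl
        exact List.cons_ne_nil _ _ htl
      have hdropj := List.drop_eq_getElem_cons hj
      rw [← htl] at hdropj
      have hrest : rest = l.drop (j + 1) := by injection hdropj with _ h2
      have hslice : PySem.List.slice l (some ((j : Int) + 1)) (some ((j : Int) + 2)) =
          rest.take 1 := by
        have h1 : ((j : Int) + 1) = ((j + 1 : Nat) : Int) := by push_cast; ring
        have h2 : ((j : Int) + 2) = ((j + 2 : Nat) : Int) := by push_cast; ring
        rw [h1, h2, PySem.List.slice_natCast, hrest]
        congr 1
        omega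
      simp only [List.zipIdx_cons, List.foldl_cons]
      have hstep : bStep l sp (c, j) =
          (if c = '.' ∧ ¬ (rest.take 1 = ['-'] ∨ rest.take 1 = [')']) then
            sp ++ [c, ' '] else sp ++ [c]) := by
        simp only [bStep, hslice]
        split_ifs <;> simp
      rw [hstep, ih (j + 1) hrest]
      simp only [bSub]
      split_ifs <;> simp

lemma step_eq (acc : List String) (degree : String) :
    ((degree.toList.zipIdx).foldl
        (aStep degree.toList (degree.toList.length - 1)) (acc, ([] : List Char), (1 : Int))).1 =
    (if degree.toList ≠ [] then
      acc ++ [String.ofList (PySem.Chars.strip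
        ((degree.toList.zipIdx).foldl (bStep degree.toList) []))]
    else acc) := by
  by_cases hnil : degree.toList = []
  · simp [hnil]
  · rw [if_pos hnil]
    rw [loopB degree.toList degree.toList 0 (by simp) []]
    rw [loopA degree.toList degree.toList 0 (by simp) hnil acc [] 1 ⟨0, by simp [ins], by simp, by simp⟩]
    rw [List.nil_append, bSub_eq_ins]
    by_cases hdot : degree.toList.getLast? = some '.'
    · rw [if_pos hdot, strip_append_space]
    · rw [if_neg hdot, List.append_nil]

lemma fold_eq (ds : List String) : ∀ (acc : List String),
    ds.foldl (fun acc degree =>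
      ((degree.toList.zipIdx).foldl
        (aStep degree.toList (degree.toList.length - 1)) (acc, ([] : List Char), (1 : Int))).1) acc
    = ds.foldl (fun out degree =>
        if degree.toList ≠ [] then
          out ++ [String.ofList (PySem.Chars.strip
            ((degree.toList.zipIdx).foldl (bStep degree.toList) []))]
        else out) acc := by
  induction ds with
  | nil => intro acc; rfl
  | cons d ds ih =>
      intro acc
      simp only [List.foldl_cons]
      rw [step_eq, ih]

-- ===== VERDICT (by name: the statement is the Claim_ definition above) =====
theorem add_empty_space_spec : Claim_equal_add_empty_space := by
  intro degrees _
  unfold Spec_add_empty_space add_empty_space add_empty_space_alt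
  exact fold_eq degrees []
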